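-- pv_equiv track=rewrite | github.com/Cap0n3/kaprekars-constant | main.py | transform_asc_desc
-- ===== SOURCE A (Python) =====
-- def transform_asc_desc(nb):
--     """
--     Transform a number into a tuple of two numbers, the first one is the number
--     with its digits sorted in ascending order, the second one is the number with
--     its digits sorted in descending order.
--     """
--     def check_three_digit(nb_lst):
--         if len(nb_lst) < 4:
--             nb_lst.insert(0, 0)
--         return nb_lst
--     to_int_lst = lambda num: [int(x) for x in str(num)]
--     to_num = lambda int_lst: int("".join([str(x) for x in int_lst]))
--     asc_lst = check_three_digit(to_int_lst(nb))
--     desc_lst = check_three_digit(to_int_lst(nb))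
--     asc_lst.sort()
--     desc_lst.sort(reverse=True)
--     return (to_num(asc_lst), to_num(desc_lst))
-- ===== SOURCE B (Python) =====
-- def transform_asc_desc(nb):
--     """
--     Transform a number into a tuple of two numbers, the first one is the number
--     with its digits sorted in ascending order, the second one is the number with
--     its digits sorted in descending order.
--     """
--     s = str(nb)
--     counts = {}
--     for ch in s:
--         d = int(ch)
--         counts[d] = counts.get(d, 0) + 1
--     if len(s) < 4:
--         counts[0] = counts.get(0, 0) + 1
--     asc = "".join(str(d) * counts.get(d, 0) for d in range(10))
--     desc = "".join(str(d) * counts.get(d, 0) for d in range(9, -1, -1))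
--     return (int(asc), int(desc))
-- ===== Notes on version B (the rewrite author's own statement) =====
-- stated objective: alternative
-- what changed: Replaces the two comparison sorts of the digit list with a single counting pass that tallies digit frequencies in a dict and emits the ascending/descending strings by digit value (counting sort).
import Mathlib
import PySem

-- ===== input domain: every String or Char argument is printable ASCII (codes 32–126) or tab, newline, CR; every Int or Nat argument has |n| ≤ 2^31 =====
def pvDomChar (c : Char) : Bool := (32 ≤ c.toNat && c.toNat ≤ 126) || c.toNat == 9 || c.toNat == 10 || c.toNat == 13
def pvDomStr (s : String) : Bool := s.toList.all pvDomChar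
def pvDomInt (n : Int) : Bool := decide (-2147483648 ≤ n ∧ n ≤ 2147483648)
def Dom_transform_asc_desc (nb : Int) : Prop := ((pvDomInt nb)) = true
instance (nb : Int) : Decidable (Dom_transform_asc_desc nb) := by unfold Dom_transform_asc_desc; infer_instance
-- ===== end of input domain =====

-- B replaces A's two comparison sorts of the digit list by one counting pass (a digit-frequency dict)
-- and emits the ascending/descending strings by digit value; same return value on all nb ≥ 0.

-- ===== PORT A =====
-- int(x) for a one-character string; Python raises ValueError (PySem: none) on a non-digit
-- character, which under Pre_ (nb ≥ 0) never happens, so .getD 0 is never the none case there.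
def pvParse (c : Char) : Int := (PySem.Int.ofChars? [c]).getD 0

def transform_asc_desc (nb : Int) : Int × Int :=
  -- nb_lst.insert(0, 0) at index 0 is consing 0
  let check_three_digit : List Int → List Int := fun nb_lst =>
    if nb_lst.length < 4 then 0 :: nb_lst else nb_lst
  let to_int_lst : Int → List Int := fun num => (PySem.Int.toChars num).map pvParse
  -- int("".join(...)): the joined string is a nonempty digit string under Pre_, so getD 0 is never the none case
  let to_num : List Int → Int := fun int_lst =>
    (PySem.Int.ofChars? (int_lst.flatMap PySem.Int.toChars)).getD 0
  let asc_lst := PySem.List.sorted (check_three_digit (to_int_lst nb)) (fun x => x) false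
  let desc_lst := PySem.List.sorted (check_three_digit (to_int_lst nb)) (fun x => x) true
  (to_num asc_lst, to_num desc_lst)

-- ===== PORT B =====
def transform_asc_desc_alt (nb : Int) : Int × Int :=
  let s := PySem.Int.toChars nb
  let counts : PySem.Dict Int Int :=
    s.foldl (fun counts ch =>
      let d := pvParse ch
      counts.insert d (counts.getD d 0 + 1)) PySem.Dict.empty
  let counts := if s.length < 4 then counts.insert 0 (counts.getD 0 0 + 1) else counts
  let asc := (PySem.List.pyRange 0 10 1).foldl
    (fun acc d => acc ++ PySem.List.pyRepeat (PySem.Int.toChars d) (counts.getD d 0)) []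
  let desc := (PySem.List.pyRange 9 (-1) (-1)).foldl
    (fun acc d => acc ++ PySem.List.pyRepeat (PySem.Int.toChars d) (counts.getD d 0)) []
  ((PySem.Int.ofChars? asc).getD 0, (PySem.Int.ofChars? desc).getD 0)

-- ===== PRECONDITION & SPEC =====
-- Pre_ excludes only negative nb, where str(nb) starts with '-' and int('-') raises ValueError in BOTH programs.
def Pre_transform_asc_desc (nb : Int) : Prop := 0 ≤ nb
instance (nb : Int) : Decidable (Pre_transform_asc_desc nb) := by unfold Pre_transform_asc_desc; infer_instance
def pvWitness_transform_asc_desc : Int := (495)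
def Spec_transform_asc_desc (nb : Int) (out : Int × Int) : Prop := out = transform_asc_desc_alt nb
instance (nb : Int) (out : Int × Int) : Decidable (Spec_transform_asc_desc nb out) := by unfold Spec_transform_asc_desc; infer_instance

-- ===== CLAIM (what is proved, stated in full; the proofs are below) =====
def Claim_equal_transform_asc_desc : Prop := ∀ (nb : Int), Dom_transform_asc_desc nb → Pre_transform_asc_desc nb → Spec_transform_asc_desc nb (transform_asc_desc nb)

-- ===== LEMMAS AND PROOFS =====

-- every character emitted by Nat.toDigitsCore (base 10) is a digit character
lemma toDigitsCore_digit : ∀ (fuel n : Nat) (acc : List Char),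
    (∀ c ∈ acc, ∃ k, k < 10 ∧ c = Nat.digitChar k) →
    ∀ c ∈ Nat.toDigitsCore 10 fuel n acc, ∃ k, k < 10 ∧ c = Nat.digitChar k := by
  intro fuel
  induction fuel with
  | zero => intro n acc hacc; simpa [Nat.toDigitsCore] using hacc
  | succ f ih =>
    intro n acc hacc c hc
    simp only [Nat.toDigitsCore] at hc
    by_cases h : n / 10 = 0
    · rw [if_pos h] at hc
      rcases List.mem_cons.mp hc with h' | hc
      · exact ⟨n % 10, Nat.mod_lt _ (by norm_num), h'⟩
      · exact hacc _ hc
    · rw [if_neg h] at hc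
      refine ih (n / 10) _ ?_ c hc
      intro c' hc'
      rcases List.mem_cons.mp hc' with h' | hc'
      · exact ⟨n % 10, Nat.mod_lt _ (by norm_num), h'⟩
      · exact hacc _ hc'

lemma toChars_digit (nb : Int) (h : 0 ≤ nb) :
    ∀ c ∈ PySem.Int.toChars nb, ∃ k, k < 10 ∧ c = Nat.digitChar k := by
  intro c hc
  rw [PySem.Int.toChars, if_neg (by omega)] at hc
  exact toDigitsCore_digit _ _ _ (by simp) c hc

lemma parse_digitChar (k : Nat) (hk : k < 10) :
    pvParse (Nat.digitChar k) = (k : Int) ∧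
    PySem.Int.toChars (k : Int) = [Nat.digitChar k] := by
  interval_cases k <;> exact ⟨by decide, by decide⟩

def pvDigits : List Int := [0,1,2,3,4,5,6,7,8,9]

-- repFlat lemmas: ds.flatMap (fun d => replicate (m d) d)
lemma mem_repFlat {ds : List Int} {m : Int → Nat} {x : Int}
    (h : x ∈ ds.flatMap (fun d => List.replicate (m d) d)) : x ∈ ds := by
  rcases List.mem_flatMap.mp h with ⟨d, hd, hx⟩
  exact (List.eq_of_mem_replicate hx) ▸ hd

lemma pairwise_repFlat {ds : List Int} {m : Int → Nat} (h : ds.Pairwise (· < ·)) :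
    (ds.flatMap (fun d => List.replicate (m d) d)).Pairwise (· ≤ ·) := by
  induction ds with
  | nil => simp
  | cons d t ih =>
    rcases List.pairwise_cons.mp h with ⟨hd, ht⟩
    rw [List.flatMap_cons, List.pairwise_append]
    refine ⟨List.pairwise_replicate.mpr (Or.inr le_rfl), ih ht, ?_⟩
    intro a ha b hb
    rw [List.eq_of_mem_replicate ha]
    exact le_of_lt (hd _ (mem_repFlat hb))

lemma count_repFlat {ds : List Int} {m : Int → Nat} (hnd : ds.Nodup) (v : Int) :
    (ds.flatMap (fun d => List.replicate (m d) d)).count v = if v ∈ ds then m v else 0 := by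
  induction ds with
  | nil => simp
  | cons d t ih =>
    rcases List.nodup_cons.mp hnd with ⟨hd, ht⟩
    rw [List.flatMap_cons, List.count_append, ih ht, List.count_replicate]
    by_cases hvd : v = d
    · subst hvd; simp [hd]
    · simp [hvd, Ne.symm hvd, List.mem_cons]

lemma perm_repFlat {l ds : List Int} (hnd : ds.Nodup) (hmem : ∀ x ∈ l, x ∈ ds) :
    (ds.flatMap (fun d => List.replicate (l.count d) d)).Perm l := by
  rw [List.perm_iff_count]
  intro v
  rw [count_repFlat hnd v]
  by_cases hv : v ∈ ds
  · simp [hv]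
  · simp [hv, List.count_eq_zero_of_not_mem (fun h => hv (hmem v h))]

-- Python's reverse sort of a bare Int list is the reverse of its forward sort
lemma sorted_rev_eq_reverse (xs : List Int) :
    PySem.List.sorted xs (fun x => x) true = (PySem.List.sorted xs (fun x => x) false).reverse := by
  have h : PySem.List.sorted xs (fun x => x) false = (PySem.List.sorted xs (fun x => x) true).reverse :=
    PySem.List.sorted_id_eq_of_perm_of_pairwise _ _
      ((List.reverse_perm _).trans (PySem.List.sorted_perm xs _ true))
      (List.pairwise_reverse.mpr (PySem.List.sorted_pairwise_rev xs _))
  rw [h, List.reverse_reverse]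

lemma flatMap_congr' {α β : Type} {l : List α} {f g : α → List β}
    (h : ∀ a ∈ l, f a = g a) : l.flatMap f = l.flatMap g := by
  induction l with
  | nil => rfl
  | cons a t ih =>
    rw [List.flatMap_cons, List.flatMap_cons, h a (List.mem_cons_self), ih (fun a ha => h a (List.mem_cons_of_mem _ ha))]

lemma replicate_flatMap_single {d : Int} {c : Char} (h : PySem.Int.toChars d = [c]) (n : Nat) :
    (List.replicate n d).flatMap PySem.Int.toChars = List.replicate n c := by
  induction n with
  | zero => rfl
  | succ k ih => rw [List.replicate_succ, List.flatMap_cons, ih, h, List.replicate_succ]; rfl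

lemma block_eq {d : Int} {c : Char} (h : PySem.Int.toChars d = [c]) (n : Nat) :
    (List.replicate n d).flatMap PySem.Int.toChars
      = PySem.List.pyRepeat (PySem.Int.toChars d) ((n : Nat) : Int) := by
  rw [h, PySem.List.pyRepeat_singleton, Int.toNat_natCast, replicate_flatMap_single h]

lemma digits_toChars : ∀ d ∈ pvDigits,
    PySem.Int.toChars d = [Nat.digitChar d.toNat] := by decide

-- proof-only name for B's digit-frequency dict (definitionally the dict B builds)
def pvCounts (s : List Char) : PySem.Dict Int Int :=
  let c := s.foldl (fun counts ch =>
      counts.insert (pvParse ch) ((counts.getD (pvParse ch) 0) + 1)) PySem.Dict.empty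
  if s.length < 4 then c.insert 0 ((c.getD 0 0) + 1) else c

-- the main equivalence, over an arbitrary digit string s (s = str(nb) for nb ≥ 0)
theorem core (s : List Char) (hdig : ∀ c ∈ s, ∃ k, k < 10 ∧ c = Nat.digitChar k) :
    ((PySem.Int.ofChars? ((PySem.List.sorted (if (s.map pvParse).length < 4 then 0 :: s.map pvParse else s.map pvParse) (fun x => x) false).flatMap PySem.Int.toChars)).getD 0,
     (PySem.Int.ofChars? ((PySem.List.sorted (if (s.map pvParse).length < 4 then 0 :: s.map pvParse else s.map pvParse) (fun x => x) true).flatMap PySem.Int.toChars)).getD 0)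
    = ((PySem.Int.ofChars? ((PySem.List.pyRange 0 10 1).foldl (fun acc d => acc ++ PySem.List.pyRepeat (PySem.Int.toChars d) ((pvCounts s).getD d 0)) [])).getD 0,
       (PySem.Int.ofChars? ((PySem.List.pyRange 9 (-1) (-1)).foldl (fun acc d => acc ++ PySem.List.pyRepeat (PySem.Int.toChars d) ((pvCounts s).getD d 0)) [])).getD 0) := by
  set digits := s.map pvParse with hdigits
  set padded := if digits.length < 4 then 0 :: digits else digits with hpadded
  have hlen : digits.length = s.length := by rw [hdigits, List.length_map]
  have hmem : ∀ x ∈ padded, x ∈ pvDigits := by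
    intro x hx
    have hx' : x = 0 ∨ x ∈ digits := by
      by_cases hl : digits.length < 4
      · rw [hpadded, if_pos hl] at hx; simpa using hx
      · rw [hpadded, if_neg hl] at hx; exact Or.inr hx
    rcases hx' with rfl | hx'
    · decide
    · rcases List.mem_map.mp hx' with ⟨c, hc, rfl⟩
      rcases hdig c hc with ⟨k, hk, rfl⟩
      rw [(parse_digitChar k hk).1]
      unfold pvDigits
      interval_cases k <;> decide
  have hcount : ∀ v : Int, (pvCounts s).getD v 0 = (padded.count v : Int) := by
    intro v
    have hbase : ∀ w : Int,
        ((s.foldl (fun counts ch =>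
          counts.insert (pvParse ch) ((counts.getD (pvParse ch) 0) + 1)) PySem.Dict.empty).getD w 0)
          = (digits.count w : Int) := by
      intro w
      have := PySem.Dict.getD_foldl_insert_add_one (s.map pvParse) PySem.Dict.empty w
      rw [List.foldl_map] at this
      simpa [PySem.Dict.getD, PySem.Dict.empty, PySem.Dict.get?, hdigits] using this
    unfold pvCounts
    by_cases hl : s.length < 4
    · have hp : padded = 0 :: digits := by rw [hpadded, if_pos (by omega)]
      simp only [if_pos hl, PySem.Dict.getD_insert, hp]
      by_cases hv : v = 0
      · subst hv; rw [if_pos rfl, hbase]; simp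
      · rw [if_neg hv, hbase]; simp [Ne.symm hv]
    · simp only [if_neg hl]
      rw [hbase, hpadded, if_neg (by omega)]
  have hasc : PySem.List.sorted padded (fun x => x) false
      = pvDigits.flatMap (fun d => List.replicate (padded.count d) d) :=
    PySem.List.sorted_id_eq_of_perm_of_pairwise _ _ (perm_repFlat (by decide) hmem)
      (pairwise_repFlat (by decide))
  have hdesc : PySem.List.sorted padded (fun x => x) true
      = (pvDigits.flatMap (fun d => List.replicate (padded.count d) d)).reverse := by
    rw [sorted_rev_eq_reverse, hasc]
  have key_asc : (PySem.List.sorted padded (fun x => x) false).flatMap PySem.Int.toChars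
      = (PySem.List.pyRange 0 10 1).foldl
          (fun acc d => acc ++ PySem.List.pyRepeat (PySem.Int.toChars d) ((pvCounts s).getD d 0)) [] := by
    rw [hasc, PySem.List.foldl_append_eq_flatMap, List.nil_append]
    have hr : PySem.List.pyRange 0 10 1 = pvDigits := by decide
    rw [hr, List.flatMap_assoc]
    apply flatMap_congr'
    intro d hd
    rw [hcount d]
    exact block_eq (digits_toChars d hd) _
  have key_desc : (PySem.List.sorted padded (fun x => x) true).flatMap PySem.Int.toChars
      = (PySem.List.pyRange 9 (-1) (-1)).foldl
          (fun acc d => acc ++ PySem.List.pyRepeat (PySem.Int.toChars d) ((pvCounts s).getD d 0)) [] := by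
    rw [hdesc, List.reverse_flatMap, PySem.List.foldl_append_eq_flatMap, List.nil_append]
    have hr : PySem.List.pyRange 9 (-1) (-1) = pvDigits.reverse := by decide
    rw [hr, List.flatMap_assoc]
    apply flatMap_congr'
    intro d hd
    simp only [Function.comp, List.reverse_replicate]
    rw [hcount d]
    exact block_eq (digits_toChars d (List.mem_reverse.mp hd)) _
  rw [key_asc, key_desc]

set_option maxHeartbeats 1000000 in
theorem transform_asc_desc_main (nb : Int) (hpre : 0 ≤ nb) :
    transform_asc_desc nb = transform_asc_desc_alt nb := by
  have h := core (PySem.Int.toChars nb) (toChars_digit nb hpre)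
  unfold transform_asc_desc transform_asc_desc_alt
  unfold pvCounts at h
  exact h

-- ===== VERDICT (by name: the statement is the Claim_ definition above) =====
theorem transform_asc_desc_spec : Claim_equal_transform_asc_desc := by
  intro nb _ hpre
  unfold Spec_transform_asc_desc
  exact transform_asc_desc_main nb hpre
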